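-- pv_equiv track=rewrite | github.com/thinksmartgroup/Vendor-Intel | vendor-intel/vendor_db.py | is_duplicate
-- ===== SOURCE A (Python) =====
-- def is_duplicate(vendor, existing_vendors):
--     """Check if a vendor already exists in the database"""
--     if not existing_vendors:
--         return False
--
--     for existing in existing_vendors:
--         # Check for duplicate based on company name or website
--         if (vendor.get('company_name') and vendor['company_name'] == existing.get('company_name')) or \
--            (vendor.get('website') and vendor['website'] == existing.get('website')):
--             return True
--     return False
-- ===== SOURCE B (Python) =====
-- def is_duplicate(vendor, existing_vendors):
--     """Check if a vendor already exists in the database"""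
--     targets = {(k, vendor[k]) for k in ('company_name', 'website') if vendor.get(k)}
--     return any((k, v) in targets
--                for existing in existing_vendors
--                for k, v in existing.items())
-- ===== Notes on version B (the rewrite author's own statement) =====
-- stated objective: simpler
-- what changed: Inverts the comparison direction: instead of testing the vendor's two fields against each row, B precomputes the set of the vendor's truthy (key, value) target pairs and makes one flat any() pass over all (key, value) items of all existing rows, with no per-field comparison logic in the loop.
import Mathlib
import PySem

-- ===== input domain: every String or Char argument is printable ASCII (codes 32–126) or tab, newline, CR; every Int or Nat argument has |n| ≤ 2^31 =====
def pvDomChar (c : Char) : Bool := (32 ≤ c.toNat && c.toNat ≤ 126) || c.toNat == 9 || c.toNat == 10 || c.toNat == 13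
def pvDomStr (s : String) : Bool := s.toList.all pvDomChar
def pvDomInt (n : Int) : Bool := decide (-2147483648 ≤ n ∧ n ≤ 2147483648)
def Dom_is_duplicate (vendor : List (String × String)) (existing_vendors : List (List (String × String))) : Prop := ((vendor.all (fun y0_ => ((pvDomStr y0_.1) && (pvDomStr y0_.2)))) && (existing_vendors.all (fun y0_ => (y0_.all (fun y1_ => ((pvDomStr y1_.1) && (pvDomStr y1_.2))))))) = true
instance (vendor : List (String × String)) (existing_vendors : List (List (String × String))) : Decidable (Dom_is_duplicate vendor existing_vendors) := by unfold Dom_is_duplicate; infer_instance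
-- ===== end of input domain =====

-- B inverts the comparison: it precomputes the vendor's truthy (key, value) target pairs as a set
-- and answers with one flat membership pass over all items of all existing rows (simpler; same cost).

-- ===== PORT A =====
-- the duplicate condition for one existing row, as in A's if
def pvMatchA (vendor existing : List (String × String)) : Bool :=
  (match PySem.Dict.get? (PySem.Dict.mk vendor) "company_name" with
   | some s => s != "" && (PySem.Dict.get? (PySem.Dict.mk existing) "company_name" == some s)
   | none => false) ||
  (match PySem.Dict.get? (PySem.Dict.mk vendor) "website" with
   | some s => s != "" && (PySem.Dict.get? (PySem.Dict.mk existing) "website" == some s)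
   | none => false)

-- A's for-loop with early return
def pvLoopA (vendor : List (String × String)) : List (List (String × String)) → Bool
  | [] => false
  | e :: rest => if pvMatchA vendor e then true else pvLoopA vendor rest

def is_duplicate (vendor : List (String × String)) (existing_vendors : List (List (String × String))) : Bool :=
  if existing_vendors.isEmpty then false else pvLoopA vendor existing_vendors

-- ===== PORT B =====
-- targets = {(k, vendor[k]) for k in ('company_name', 'website') if vendor.get(k)}
def pvTargets (vdr : List (String × String)) : PySem.Set (String × String) :=
  PySem.Set.ofList (["company_name", "website"].filterMap (fun k =>
    match PySem.Dict.get? (PySem.Dict.mk vdr) k with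
    | some v => if v != "" then some (k, v) else none
    | none => none))

-- any((k, v) in targets for existing in existing_vendors for k, v in existing.items())
def is_duplicate_alt (vendor : List (String × String)) (existing_vendors : List (List (String × String))) : Bool :=
  existing_vendors.any (fun existing =>
    ((PySem.Dict.mk existing).items).any (fun kv => PySem.Set.contains (pvTargets vendor) kv))

-- ===== PRECONDITION & SPEC =====
-- Pre_ requires each existing row's keys to be distinct: a Python dict cannot carry duplicate
-- keys, so association lists with duplicate keys represent no Python input of A at all.
def Pre_is_duplicate (vendor : List (String × String)) (existing_vendors : List (List (String × String))) : Prop :=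
  ∀ e ∈ existing_vendors, (e.map Prod.fst).Nodup
instance (vendor : List (String × String)) (existing_vendors : List (List (String × String))) : Decidable (Pre_is_duplicate vendor existing_vendors) := by unfold Pre_is_duplicate; infer_instance

def pvWitness_is_duplicate : (List (String × String)) × (List (List (String × String))) :=
  ([("company_name", "Acme")], [[("company_name", "Acme"), ("website", "acme.com")]])

def Spec_is_duplicate (vendor : List (String × String)) (existing_vendors : List (List (String × String))) (out : Bool) : Prop := out = is_duplicate_alt vendor existing_vendors
instance (vendor : List (String × String)) (existing_vendors : List (List (String × String))) (out : Bool) : Decidable (Spec_is_duplicate vendor existing_vendors out) := by unfold Spec_is_duplicate; infer_instance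

-- ===== CLAIM (what is proved, stated in full; the proofs are below) =====
def Claim_equal_is_duplicate : Prop := ∀ (vendor : List (String × String)) (existing_vendors : List (List (String × String))), Dom_is_duplicate vendor existing_vendors → Pre_is_duplicate vendor existing_vendors → Spec_is_duplicate vendor existing_vendors (is_duplicate vendor existing_vendors)

-- ===== LEMMAS AND PROOFS =====

-- A's loop is an 'any' of the row condition
theorem pvLoopA_eq_any (vendor : List (String × String)) (evs : List (List (String × String))) :
    pvLoopA vendor evs = evs.any (pvMatchA vendor) := by
  induction evs with
  | nil => rfl
  | cons e rest ih =>
    rw [pvLoopA, ih]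
    cases h : pvMatchA vendor e <;> simp [h]

-- membership in B's target set, spelled out
theorem mem_pvTargets (vendor : List (String × String)) (kv : String × String) :
    kv ∈ pvTargets vendor ↔
      ((kv.1 = "company_name" ∨ kv.1 = "website") ∧ kv.2 ≠ "" ∧
        PySem.Dict.get? (PySem.Dict.mk vendor) kv.1 = some kv.2) := by
  obtain ⟨k, v⟩ := kv
  simp only [pvTargets, PySem.Set.mem_ofList, List.mem_filterMap, List.mem_cons,
    List.not_mem_nil, or_false]
  constructor
  · rintro ⟨k', hk', hmatch⟩
    cases hg : PySem.Dict.get? (PySem.Dict.mk vendor) k' <;> rw [hg] at hmatch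
    · exact absurd hmatch (by simp)
    · rename_i w
      by_cases hw : w = ""
      · simp [hw] at hmatch
      · simp only [show (w != "") = true by simp [hw], if_true] at hmatch
        obtain ⟨hkk, hwv⟩ : k' = k ∧ w = v := by
          have := Option.some.inj hmatch
          exact ⟨congrArg Prod.fst this, congrArg Prod.snd this⟩
        subst hkk; subst hwv
        exact ⟨hk', hw, hg⟩
  · rintro ⟨hk, hne, hg⟩
    exact ⟨k, by tauto, by simp [hg, hne]⟩

-- one row of B equals A's row condition, given distinct keys in the row
theorem pvRowB_eq_matchA (vendor e : List (String × String)) (hnd : (e.map Prod.fst).Nodup) :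
    ((PySem.Dict.mk e).items).any (fun kv => PySem.Set.contains (pvTargets vendor) kv)
      = pvMatchA vendor e := by
  have hkeys : (PySem.Dict.mk e).keys.Nodup := hnd
  rw [Bool.eq_iff_iff]
  simp only [List.any_eq_true, PySem.Set.contains_iff, mem_pvTargets]
  constructor
  · rintro ⟨⟨k, v⟩, hmem, hk, hne, hg⟩
    have hge : PySem.Dict.get? (PySem.Dict.mk e) k = some v :=
      (PySem.Dict.get?_eq_some_iff_mem_items (PySem.Dict.mk e) k v hkeys).mpr hmem
    unfold pvMatchA
    rcases hk with rfl | rfl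
    · simp [hg, hge, hne]
    · simp [hg, hge, hne]
  · intro hm
    unfold pvMatchA at hm
    rw [Bool.or_eq_true] at hm
    rcases hm with h | h
    · cases hg : PySem.Dict.get? (PySem.Dict.mk vendor) "company_name" with
      | none => rw [hg] at h; exact absurd h (by simp)
      | some s =>
        rw [hg] at h
        have hne : s ≠ "" := by by_contra hc; subst hc; simp at h
        have hge : PySem.Dict.get? (PySem.Dict.mk e) "company_name" = some s := by
          cases hq : PySem.Dict.get? (PySem.Dict.mk e) "company_name" <;> rw [hq] at h <;> simp_all
        exact ⟨("company_name", s),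
          (PySem.Dict.get?_eq_some_iff_mem_items (PySem.Dict.mk e) _ s hkeys).mp hge,
          Or.inl rfl, hne, hg⟩
    · cases hg : PySem.Dict.get? (PySem.Dict.mk vendor) "website" with
      | none => rw [hg] at h; exact absurd h (by simp)
      | some s =>
        rw [hg] at h
        have hne : s ≠ "" := by by_contra hc; subst hc; simp at h
        have hge : PySem.Dict.get? (PySem.Dict.mk e) "website" = some s := by
          cases hq : PySem.Dict.get? (PySem.Dict.mk e) "website" <;> rw [hq] at h <;> simp_all
        exact ⟨("website", s),
          (PySem.Dict.get?_eq_some_iff_mem_items (PySem.Dict.mk e) _ s hkeys).mp hge,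
          Or.inr rfl, hne, hg⟩

-- any over the same list with pointwise-equal predicates on members
theorem pvAny_congr_mem {α : Type} (l : List α) (f g : α → Bool)
    (h : ∀ x ∈ l, f x = g x) : l.any f = l.any g := by
  induction l with
  | nil => rfl
  | cons x rest ih =>
    simp only [List.any_cons, h x (by simp), ih (fun y hy => h y (by simp [hy]))]

-- ===== VERDICT (by name: the statement is the Claim_ definition above) =====
theorem is_duplicate_spec : Claim_equal_is_duplicate := by
  intro vendor evs _ hpre
  unfold Spec_is_duplicate is_duplicate is_duplicate_alt
  cases hevs : evs with
  | nil => simp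
  | cons e rest =>
    simp only [List.isEmpty_cons, if_neg (by simp : ¬ false = true)]
    rw [pvLoopA_eq_any]
    refine (pvAny_congr_mem _ _ _ ?_).symm
    intro x hx
    exact pvRowB_eq_matchA vendor x (hpre x (hevs ▸ hx))
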